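-- pv_equiv track=rewrite | github.com/Z3ZEL/cpbxS3 | tp_blanc.py | prefixe
-- ===== SOURCE A (Python) =====
-- def prefixe(L1,L2):
--     maxPrefixeLength=0
--     maxPrefixeIndex=0
--     for i in range(len(L2)):
--         prefixeLength = 0
--         for j in range (len(L1)):
--             if(j+i >= len(L2)):
--                 break
--             if(L2[j+i] == L1[j]):
--                 prefixeLength +=1
--         if prefixeLength > maxPrefixeLength:
--             maxPrefixeLength = prefixeLength
--             maxPrefixeIndex = i
--     return ((maxPrefixeIndex,maxPrefixeLength) if maxPrefixeLength > 0 else  None)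
-- ===== SOURCE B (Python) =====
-- def prefixe(L1, L2):
--     index = {}
--     for j, v in enumerate(L1):
--         index[v] = index.get(v, []) + [j]
--     hist = [0] * len(L2)
--     for k, v in enumerate(L2):
--         for j in index.get(v, []):
--             if j <= k:
--                 hist[k - j] += 1
--     best_i = 0
--     best_c = 0
--     for i, c in enumerate(hist):
--         if c > best_c:
--             best_i = i
--             best_c = c
--     return (best_i, best_c) if best_c > 0 else None
-- ===== Notes on version B (the rewrite author's own statement) =====
-- stated objective: faster
-- what changed: Instead of rescanning L1 against L2 for every offset, B builds a value-to-positions index of L1 once and accumulates match counts into an offset histogram in a single pass over L2, then scans the histogram for the first strict maximum.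
import Mathlib
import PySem

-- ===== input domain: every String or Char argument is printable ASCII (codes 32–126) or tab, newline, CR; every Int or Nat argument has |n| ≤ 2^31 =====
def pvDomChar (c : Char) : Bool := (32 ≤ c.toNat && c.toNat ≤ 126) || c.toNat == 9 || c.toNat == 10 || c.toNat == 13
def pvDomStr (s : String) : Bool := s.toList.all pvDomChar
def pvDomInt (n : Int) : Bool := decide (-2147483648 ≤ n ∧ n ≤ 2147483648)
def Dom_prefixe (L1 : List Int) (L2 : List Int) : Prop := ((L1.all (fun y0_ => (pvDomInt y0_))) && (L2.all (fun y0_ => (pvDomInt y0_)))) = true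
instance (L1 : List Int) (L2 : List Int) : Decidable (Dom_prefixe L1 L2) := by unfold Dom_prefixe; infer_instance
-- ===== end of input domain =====

-- B replaces A's offset-by-offset rescan with a value→positions index of L1 and one
-- offset histogram pass over L2 (objective: faster on inputs with few coincidences).

-- ===== PORT A =====
-- inner 'for j in range(len(L1))' with its break, carried accumulator prefixeLength
def prefixeInner (L1 L2 : List Int) (i : Int) : List Int → Int → Int
  | [], pl => pl
  | j :: js, pl =>
    if (L2.length : Int) ≤ j + i then pl
    else prefixeInner L1 L2 i js
      (if PySem.List.pyGetD L2 (j + i) 0 = PySem.List.pyGetD L1 j 0 then pl + 1 else pl)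

def prefixe (L1 : List Int) (L2 : List Int) : Option (Int × Int) :=
  -- state (maxPrefixeLength, maxPrefixeIndex)
  let st := (PySem.List.pyRange 0 (L2.length) 1).foldl
    (fun (st : Int × Int) i =>
      let pl := prefixeInner L1 L2 i (PySem.List.pyRange 0 (L1.length) 1) 0
      if st.1 < pl then (pl, i) else st) (0, 0)
  if 0 < st.1 then some (st.2, st.1) else none

-- ===== PORT B =====
-- index[v] = index.get(v, []) + [j]
def prefixeIndex (L1 : List Int) : PySem.Dict Int (List Int) :=
  (PySem.List.enumerate L1 0).foldl (fun d p => d.modify p.2 [] (· ++ [p.1])) PySem.Dict.empty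

-- for j in index.get(v, []): if j <= k: hist[k-j] += 1
def prefixeAddHits (hist : List Int) (k : Int) (js : List Int) : List Int :=
  js.foldl (fun h j =>
    if j ≤ k then PySem.List.pySetD h (k - j) (PySem.List.pyGetD h (k - j) 0 + 1) else h) hist

def prefixe_alt (L1 : List Int) (L2 : List Int) : Option (Int × Int) :=
  let index := prefixeIndex L1
  let hist := (PySem.List.enumerate L2 0).foldl
      (fun h p => prefixeAddHits h p.1 (index.getD p.2 [])) (List.replicate L2.length 0)
  let st := (PySem.List.enumerate hist 0).foldl
      (fun (st : Int × Int) p => if st.2 < p.2 then p else st) (0, 0)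
  if 0 < st.2 then some st else none

-- ===== PRECONDITION & SPEC =====
def Spec_prefixe (L1 : List Int) (L2 : List Int) (out : Option (Int × Int)) : Prop := out = prefixe_alt L1 L2
instance (L1 : List Int) (L2 : List Int) (out : Option (Int × Int)) : Decidable (Spec_prefixe L1 L2 out) := by unfold Spec_prefixe; infer_instance

-- ===== CLAIM (what is proved, stated in full; the proofs are below) =====
def Claim_equal_prefixe : Prop := ∀ (L1 : List Int) (L2 : List Int), Dom_prefixe L1 L2 → Spec_prefixe L1 L2 (prefixe L1 L2)

-- ===== LEMMAS AND PROOFS =====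

-- the number of matches of alignment offset i, counted over positions k of L2
def cntK (L1 L2 : List Int) (i : Nat) : Nat :=
  ((Finset.range L2.length).filter
    (fun k => i ≤ k ∧ k - i < L1.length ∧ L1.getD (k - i) 0 = L2.getD k 0)).card

-- the same count in A's variable j (position in L1), from start index a
def cntA (L1 L2 : List Int) (i a : Nat) : Nat :=
  ((Finset.Ico a L1.length).filter
    (fun j => j + i < L2.length ∧ L1.getD j 0 = L2.getD (j + i) 0)).card

lemma innerA_eq (L1 L2 : List Int) (i : Nat) :
    ∀ (n a : Nat) (pl : Int), L1.length - a = n →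
      prefixeInner L1 L2 (i : Int) (PySem.List.pyRange a L1.length 1) pl
        = pl + (cntA L1 L2 i a : Int) := by
  intro n
  induction n with
  | zero =>
    intro a pl hn
    have ha : L1.length ≤ a := by omega
    rw [PySem.List.pyRange_one_eq_nil (by exact_mod_cast ha)]
    have h0 : cntA L1 L2 i a = 0 := by
      have : Finset.Ico a L1.length = ∅ := Finset.Ico_eq_empty (by omega)
      simp [cntA, this]
    simp [prefixeInner, h0]
  | succ m ih =>
    intro a pl hn
    have ha : a < L1.length := by omega
    rw [PySem.List.pyRange_one_cons (by exact_mod_cast ha)]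
    simp only [prefixeInner]
    by_cases hbr : (L2.length : Int) ≤ (a : Int) + (i : Int)
    · rw [if_pos hbr]
      have hbr' : L2.length ≤ a + i := by exact_mod_cast hbr
      have h0 : cntA L1 L2 i a = 0 := by
        unfold cntA
        rw [Finset.card_eq_zero, Finset.filter_eq_empty_iff]
        intro j hj
        simp only [Finset.mem_Ico] at hj
        intro hc
        omega
      simp [h0]
    · rw [if_neg hbr]
      have h2 : a + i < L2.length := by
        have : ¬ (L2.length : Int) ≤ (a : Int) + (i : Int) := hbr
        omega
      have hcast : (a : Int) + 1 = ((a + 1 : Nat) : Int) := by push_cast; ring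
      rw [hcast, ih (a + 1) _ (by omega)]
      have hsplit : cntA L1 L2 i a
          = (if L1.getD a 0 = L2.getD (a + i) 0 then 1 else 0) + cntA L1 L2 i (a + 1) := by
        unfold cntA
        have hins : Finset.Ico a L1.length = insert a (Finset.Ico (a + 1) L1.length) := by
          ext x; simp only [Finset.mem_Ico, Finset.mem_insert]; omega
        rw [hins, Finset.filter_insert]
        by_cases hm : L1.getD a 0 = L2.getD (a + i) 0
        · rw [if_pos ⟨h2, hm⟩, Finset.card_insert_of_notMem (by simp), if_pos hm]
          omega
        · rw [if_neg (by intro hc; exact hm hc.2), if_neg hm]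
          omega
      have hget2 : PySem.List.pyGetD L2 ((a : Int) + (i : Int)) 0 = L2.getD (a + i) 0 := by
        rw [show (a : Int) + (i : Int) = ((a + i : Nat) : Int) by push_cast; ring,
          PySem.List.pyGetD_natCast]
      have hget1 : PySem.List.pyGetD L1 (a : Int) 0 = L1.getD a 0 :=
        PySem.List.pyGetD_natCast L1 a 0
      rw [hget2, hget1, hsplit]
      by_cases hm : L1.getD a 0 = L2.getD (a + i) 0
      · rw [if_pos hm.symm, if_pos hm]; push_cast; ring
      · rw [if_neg (fun hc => hm hc.symm), if_neg hm]; push_cast; ring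

lemma cntA_eq_cntK (L1 L2 : List Int) (i : Nat) : cntA L1 L2 i 0 = cntK L1 L2 i := by
  unfold cntA cntK
  rw [show Finset.Ico 0 L1.length = Finset.range L1.length by
    rw [Finset.range_eq_Ico]]
  apply Finset.card_bij' (i := fun j _ => j + i) (j := fun k _ => k - i)
  · intro a ha
    simp only [Finset.mem_filter, Finset.mem_range] at ha ⊢
    refine ⟨ha.2.1, by omega, ?_⟩
    rw [Nat.add_sub_cancel]
    exact ⟨ha.1, ha.2.2⟩
  · intro b hb
    simp only [Finset.mem_filter, Finset.mem_range] at hb ⊢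
    obtain ⟨hb1, hb2, hb3, hb4⟩ := hb
    refine ⟨hb3, ?_, ?_⟩
    · omega
    · rw [show b - i + i = b by omega]
      exact hb4
  · intro a _; omega
  · intro b hb
    simp only [Finset.mem_filter, Finset.mem_range] at hb
    omega

lemma index_go (v : Int) :
    ∀ (L : List Int) (s : Int) (d : PySem.Dict Int (List Int)),
      ((PySem.List.enumerate L s).foldl (fun d p => d.modify p.2 [] (· ++ [p.1])) d).getD v []
        = d.getD v [] ++ ((PySem.List.enumerate L s).filter (fun p => p.2 == v)).map (·.1) := by
  intro L
  induction L with
  | nil => intro s d; simp [PySem.List.enumerate_nil]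
  | cons x xs ih =>
    intro s d
    rw [PySem.List.enumerate_cons]
    simp only [List.foldl_cons, List.filter_cons]
    by_cases hx : x = v
    · subst hx
      rw [ih, PySem.Dict.getD_modify_self]
      simp [List.append_assoc]
    · rw [ih, PySem.Dict.getD_modify_of_ne _ _ _ (fun h => hx h.symm)]
      simp [hx]

lemma index_getD (L1 : List Int) (v : Int) :
    (prefixeIndex L1).getD v []
      = ((PySem.List.enumerate L1 0).filter (fun p => p.2 == v)).map (·.1) := by
  unfold prefixeIndex
  rw [index_go]
  simp

lemma mem_index (L1 : List Int) (v j : Int) :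
    j ∈ (prefixeIndex L1).getD v []
      ↔ ∃ m : Nat, m < L1.length ∧ j = (m : Int) ∧ L1.getD m 0 = v := by
  rw [index_getD]
  simp only [List.mem_map, List.mem_filter, PySem.List.mem_enumerate_iff]
  constructor
  · rintro ⟨p, ⟨⟨m, hm, rfl⟩, hv⟩, rfl⟩
    simp only [beq_iff_eq] at hv
    exact ⟨m, hm, by simp, by rw [List.getD_eq_getElem _ _ hm]; exact hv⟩
  · rintro ⟨m, hm, rfl, hv⟩
    refine ⟨((m : Int), L1[m]), ⟨⟨m, hm, by simp⟩, ?_⟩, rfl⟩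
    simp only [beq_iff_eq]
    rw [List.getD_eq_getElem _ _ hm] at hv
    exact hv

lemma nodup_index (L1 : List Int) (v : Int) : ((prefixeIndex L1).getD v []).Nodup := by
  rw [index_getD]
  have hp : ((PySem.List.enumerate L1 0).filter (fun p => p.2 == v)).Pairwise
      (fun p q => p.1 < q.1) :=
    List.Pairwise.filter _ (PySem.List.pairwise_lt_enumerate L1 0)
  have : (((PySem.List.enumerate L1 0).filter (fun p => p.2 == v)).map (·.1)).Pairwise
      (fun a b => a < b) := List.pairwise_map.2 hp
  exact this.imp ne_of_lt

lemma addHits_length (k : Int) : ∀ (js : List Int) (h : List Int),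
    (prefixeAddHits h k js).length = h.length := by
  intro js
  induction js with
  | nil => intro h; rfl
  | cons j js ih =>
    intro h
    show (prefixeAddHits (if j ≤ k then _ else _) k js).length = _
    rw [ih]
    split_ifs
    · exact PySem.List.length_pySetD _ _ _
    · rfl

lemma addHits_getD (k : Int) : ∀ (js : List Int), (∀ j ∈ js, 0 ≤ j) →
    ∀ (h : List Int) (i : Nat), i < h.length → k < (h.length : Int) →
      (prefixeAddHits h k js).getD i 0
        = h.getD i 0 + (js.countP (fun j => j = k - (i : Int)) : Int) := by
  intro js
  induction js with
  | nil => intro _ h i _ _; simp [prefixeAddHits]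
  | cons j js ih =>
    intro hjs h i hi hk
    have h0j : (0 : Int) ≤ j := hjs j List.mem_cons_self
    rw [List.countP_cons]
    simp only [decide_eq_true_eq]
    show (prefixeAddHits (if j ≤ k then _ else _) k js).getD i 0 = _
    by_cases hjk : j ≤ k
    · rw [if_pos hjk]
      have hnn : (0 : Int) ≤ k - j := by omega
      rw [PySem.List.pySetD_of_nonneg _ _ hnn]
      have hlen : (h.set (k - j).toNat (PySem.List.pyGetD h (k - j) 0 + 1)).length = h.length :=
        List.length_set
      rw [ih (fun x hx => hjs x (List.mem_cons_of_mem _ hx)) _ i (by omega) (by omega)]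
      have hget : (h.set (k - j).toNat (PySem.List.pyGetD h (k - j) 0 + 1)).getD i 0
          = h.getD i 0 + (if j = k - (i : Int) then 1 else 0) := by
        rw [List.getD_eq_getElem?_getD, List.getD_eq_getElem?_getD, List.getElem?_set]
        by_cases he : (k - j).toNat = i
        · rw [if_pos he, if_pos (show (k - j).toNat < h.length by omega),
            if_pos (show j = k - (i : Int) by omega),
            PySem.List.pyGetD_of_nonneg _ _ hnn, he]
          simp [List.getD_eq_getElem?_getD, List.getElem?_eq_getElem hi]
        · rw [if_neg he, if_neg (show ¬ j = k - (i : Int) by omega)]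
          simp
      rw [hget]
      split_ifs <;> push_cast <;> ring
    · rw [if_neg hjk]
      rw [ih (fun x hx => hjs x (List.mem_cons_of_mem _ hx)) _ i hi hk]
      rw [if_neg (by intro hc; rw [hc] at hjk; omega)]
      push_cast; ring

-- partial count: matches at offset i among positions k < N
def cntUpTo (L1 L2 : List Int) (i N : Nat) : Nat :=
  ((Finset.range N).filter
    (fun k => i ≤ k ∧ k - i < L1.length ∧ L1.getD (k - i) 0 = L2.getD k 0)).card

lemma hist_go (L1 L2 : List Int) :
    ∀ (n K : Nat) (h : List Int), L2.length - K = n → K ≤ L2.length →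
      h.length = L2.length → (∀ i, i < L2.length → h.getD i 0 = (cntUpTo L1 L2 i K : Int)) →
      let r := (PySem.List.enumerate (L2.drop K) (K : Int)).foldl
        (fun h p => prefixeAddHits h p.1 ((prefixeIndex L1).getD p.2 [])) h
      r.length = L2.length ∧ ∀ i, i < L2.length → r.getD i 0 = (cntK L1 L2 i : Int) := by
  intro n
  induction n with
  | zero =>
    intro K h hn hK hl hh
    have hKe : K = L2.length := by omega
    subst hKe
    rw [List.drop_length, PySem.List.enumerate_nil]
    refine ⟨by simpa using hl, fun i hi => ?_⟩
    simp only [List.foldl_nil]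
    rw [hh i hi]; rfl
  | succ m ih =>
    intro K h hn hK hl hh
    have hKlt : K < L2.length := by omega
    rw [show L2.drop K = L2[K] :: L2.drop (K + 1) from (List.getElem_cons_drop (show K < L2.length from hKlt)).symm]
    rw [PySem.List.enumerate_cons]
    simp only [List.foldl_cons]
    have hjs0 : ∀ j ∈ (prefixeIndex L1).getD L2[K] [], (0 : Int) ≤ j := by
      intro j hj
      obtain ⟨m', _, rfl, _⟩ := (mem_index L1 L2[K] j).1 hj
      exact Int.natCast_nonneg m'
    have hl1 : (prefixeAddHits h (K : Int) ((prefixeIndex L1).getD L2[K] [])).length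
        = L2.length := by rw [addHits_length]; exact hl
    have hh1 : ∀ i, i < L2.length →
        (prefixeAddHits h (K : Int) ((prefixeIndex L1).getD L2[K] [])).getD i 0
          = (cntUpTo L1 L2 i (K + 1) : Int) := by
      intro i hi
      rw [addHits_getD _ _ hjs0 h i (by omega) (by rw [hl]; exact_mod_cast hKlt), hh i hi]
      have hstep : cntUpTo L1 L2 i (K + 1)
          = cntUpTo L1 L2 i K
            + (if i ≤ K ∧ K - i < L1.length ∧ L1.getD (K - i) 0 = L2.getD K 0 then 1 else 0) := by
        unfold cntUpTo
        rw [Finset.range_add_one, Finset.filter_insert]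
        split_ifs with hc
        · rw [Finset.card_insert_of_notMem (by simp)]
        · rfl
      have hc : ((prefixeIndex L1).getD L2[K] []).countP (fun j => j = (K : Int) - (i : Int))
          = if i ≤ K ∧ K - i < L1.length ∧ L1.getD (K - i) 0 = L2.getD K 0 then 1 else 0 := by
        by_cases hC : i ≤ K ∧ K - i < L1.length ∧ L1.getD (K - i) 0 = L2.getD K 0
        · rw [if_pos hC]
          have hmem : (K : Int) - (i : Int) ∈ (prefixeIndex L1).getD L2[K] [] := by
            rw [mem_index]
            refine ⟨K - i, hC.2.1, by omega, ?_⟩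
            rw [hC.2.2, List.getD_eq_getElem _ _ hKlt]
          have hcp : ((prefixeIndex L1).getD L2[K] []).countP
              (fun j => j = (K : Int) - (i : Int))
                = ((prefixeIndex L1).getD L2[K] []).count ((K : Int) - (i : Int)) := by
            apply List.countP_congr
            intro a _
            by_cases hac : a = (K : Int) - (i : Int) <;> simp [hac]
          rw [hcp]
          exact List.count_eq_one_of_mem (nodup_index L1 L2[K]) hmem
        · rw [if_neg hC]
          rw [List.countP_eq_zero]
          intro j hj
          simp only [decide_eq_true_eq]
          intro hje
          obtain ⟨m', hm', hjm, hv⟩ := (mem_index L1 L2[K] j).1 hj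
          apply hC
          have hiK : i ≤ K := by omega
          have hm'e : m' = K - i := by omega
          subst hm'e
          exact ⟨hiK, hm', by rw [hv, List.getD_eq_getElem _ _ hKlt]⟩
      rw [hc, hstep]
      split_ifs <;> push_cast <;> ring
    have := ih (K + 1) (prefixeAddHits h (K : Int) ((prefixeIndex L1).getD L2[K] []))
      (by omega) (by omega) hl1 hh1
    rw [show (K : Int) + 1 = ((K + 1 : Nat) : Int) by push_cast; ring]
    exact this

lemma swap_scan (F : Nat → Int) :
    ∀ (l : List Nat) (a b : Int),
      l.foldl (fun (st : Int × Int) k => if st.1 < F k then (F k, (k : Int)) else st) (a, b)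
        = Prod.swap (l.foldl (fun (st : Int × Int) k => if st.2 < F k then ((k : Int), F k) else st) (b, a)) := by
  intro l
  induction l with
  | nil => intro a b; rfl
  | cons x l ih =>
    intro a b
    simp only [List.foldl_cons]
    by_cases hc : a < F x
    · simp only [if_pos hc]
      exact ih (F x) (x : Int)
    · simp only [if_neg hc]
      exact ih a b

lemma prefixe_eq (L1 L2 : List Int) :
    prefixe L1 L2 =
      (fun st : Int × Int => if 0 < st.1 then some (st.2, st.1) else none)
        ((List.range L2.length).foldl
          (fun (st : Int × Int) k =>
            if st.1 < (cntK L1 L2 k : Int) then ((cntK L1 L2 k : Int), (k : Int)) else st)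
          (0, 0)) := by
  have hin : ∀ k : Nat,
      prefixeInner L1 L2 (k : Int) (PySem.List.pyRange 0 (L1.length : Int) 1) 0
        = (cntK L1 L2 k : Int) := by
    intro k
    have h := innerA_eq L1 L2 k L1.length 0 0 (by omega)
    rw [cntA_eq_cntK] at h
    simpa using h
  simp only [prefixe]
  rw [PySem.List.pyRange_one 0 ((L2.length : Int))]
  simp only [sub_zero, Int.toNat_natCast, List.foldl_map, zero_add]
  have hcong := PySem.List.foldl_congr_mem (List.range L2.length)
    (fun (st : Int × Int) k =>
      if st.1 < prefixeInner L1 L2 (k : Int) (PySem.List.pyRange 0 (L1.length : Int) 1) 0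
      then (prefixeInner L1 L2 (k : Int) (PySem.List.pyRange 0 (L1.length : Int) 1) 0, (k : Int))
      else st)
    (fun (st : Int × Int) k =>
      if st.1 < (cntK L1 L2 k : Int) then ((cntK L1 L2 k : Int), (k : Int)) else st)
    ((0 : Int), (0 : Int))
    (fun acc k _ => by simp only [hin])
  rw [hcong]

lemma prefixe_alt_eq (L1 L2 : List Int) :
    prefixe_alt L1 L2 =
      (fun st : Int × Int => if 0 < st.2 then some st else none)
        ((List.range L2.length).foldl
          (fun (st : Int × Int) k =>
            if st.2 < (cntK L1 L2 k : Int) then ((k : Int), (cntK L1 L2 k : Int)) else st)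
          (0, 0)) := by
  simp only [prefixe_alt]
  set hist : List Int := List.foldl
      (fun h p => prefixeAddHits h p.1 ((prefixeIndex L1).getD p.2 []))
      (List.replicate L2.length 0) (PySem.List.enumerate L2 0) with hdef
  have hg := hist_go L1 L2 L2.length 0 (List.replicate L2.length 0) (by omega) (by omega)
    (by simp)
    (fun i hi => by
      simp only [List.getD_eq_getElem?_getD, List.getElem?_replicate]
      simp [cntUpTo, hi])
  simp only [List.drop_zero, Nat.cast_zero] at hg
  rw [← hdef] at hg
  obtain ⟨hl, hh⟩ := hg
  rw [PySem.List.enumerate_eq_map_pyRange hist 0]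
  simp only [PySem.List.len_eq, hl]
  rw [PySem.List.pyRange_one 0 ((L2.length : Int))]
  simp only [sub_zero, Int.toNat_natCast, List.foldl_map, zero_add]
  have hcong := PySem.List.foldl_congr_mem (List.range L2.length)
    (fun (st : Int × Int) k =>
      if st.2 < PySem.List.pyGetD hist (k : Int) 0
      then ((k : Int), PySem.List.pyGetD hist (k : Int) 0) else st)
    (fun (st : Int × Int) k =>
      if st.2 < (cntK L1 L2 k : Int) then ((k : Int), (cntK L1 L2 k : Int)) else st)
    ((0 : Int), (0 : Int))
    (fun acc k hk => by simp only [PySem.List.pyGetD_natCast, hh k (List.mem_range.1 hk)])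
  rw [hcong]

-- ===== VERDICT (by name: the statement is the Claim_ definition above) =====
theorem prefixe_spec : Claim_equal_prefixe := by
  unfold Claim_equal_prefixe Spec_prefixe
  intro L1 L2 _
  rw [prefixe_eq, prefixe_alt_eq]
  rw [swap_scan (fun k => (cntK L1 L2 k : Int)) (List.range L2.length) 0 0]
  cases (List.range L2.length).foldl
      (fun (st : Int × Int) k =>
        if st.2 < (cntK L1 L2 k : Int) then ((k : Int), (cntK L1 L2 k : Int)) else st)
      (0, 0) with
  | mk x y => simp
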